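-- pv_equiv track=rewrite | github.com/cldowdy/code-for-tampa-bay | program/assignment2add_charges.py | quote_comma_fix
-- ===== SOURCE A (Python) =====
-- def quote_comma_fix(aline):
--         """The purpose of this function is to go through the a string, and change all commas inside
--         of double quotes into periods. The function works by keeping a level parameter, and adding or
--         substracting from it every time it encounters a double quote. While inside the first level, if
--         a comma is encountered, it is substituded for a period
--
--         Arguments
--         --------
--         aline -- a string with weird commas
--         """
--
--         list_line = list(aline)
--         level = 0
--         for i, c in enumerate(list_line):
--                 if c == '"' and level == 0:
--                         level += 1
--                 elif c =='"' and level >= 1: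
--                         level -= 1
--                 else:
--                         pass
--
--                 if c == "," and level >= 1:
--                         list_line[i] = "."
--
--         clean_line = "".join(list_line)
--         return clean_line
-- ===== SOURCE B (Python) =====
-- def quote_comma_fix(aline):
--     """Split on the double-quote character; segments alternate outside/inside quotes,
--     so swap commas for periods in every inside (odd-indexed) segment and rejoin."""
--     out = []
--     inside = False
--     for seg in aline.split('"'):
--         out.append(seg.replace(',', '.') if inside else seg)
--         inside = not inside
--     return '"'.join(out)
-- ===== Notes on version B (the rewrite author's own statement) =====
-- stated objective: faster
-- what changed: Replaces the per-character level-toggling loop with a split on the double-quote character, converting commas only in the odd (inside-quotes) segments via str.replace and rejoining; the C-level split/replace/join removes the Python-level per-character loop.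
import Mathlib
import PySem

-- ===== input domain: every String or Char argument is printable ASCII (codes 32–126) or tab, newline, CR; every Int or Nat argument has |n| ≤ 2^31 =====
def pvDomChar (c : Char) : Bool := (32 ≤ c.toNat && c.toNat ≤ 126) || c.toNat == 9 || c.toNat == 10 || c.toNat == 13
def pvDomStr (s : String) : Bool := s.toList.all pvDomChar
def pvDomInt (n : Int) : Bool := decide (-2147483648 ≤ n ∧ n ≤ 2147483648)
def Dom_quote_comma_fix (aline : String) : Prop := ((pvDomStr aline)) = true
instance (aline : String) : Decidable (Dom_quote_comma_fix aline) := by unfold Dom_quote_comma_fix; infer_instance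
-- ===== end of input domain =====

-- B replaces A's per-character quote-level loop with split-on-double-quote / convert odd segments / rejoin (measured faster by a constant factor).

-- ===== PORT A =====
-- A's for-loop over the characters with its integer `level`, one step per character.
def quote_comma_fix_go (level : Int) : List Char → List Char
  | [] => []
  | c :: cs =>
    let level' := if c = '"' ∧ level = 0 then level + 1
                  else if c = '"' ∧ level ≥ 1 then level - 1
                  else level
    let c' := if c = ',' ∧ level' ≥ 1 then '.' else c
    c' :: quote_comma_fix_go level' cs

def quote_comma_fix (aline : String) : String :=
  String.mk (quote_comma_fix_go 0 aline.toList)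

-- ===== PORT B =====
-- aline.split('"') for the single-character separator '"': (first segment, remaining segments). Exact hand port.
def splitQuote : List Char → List Char × List (List Char)
  | [] => ([], [])
  | c :: cs =>
    let p := splitQuote cs
    if c = '"' then ([], p.1 :: p.2) else (c :: p.1, p.2)

-- seg.replace(',', '.') for single characters is a per-character map. Exact hand port.
def convComma (c : Char) : Char := if c = ',' then '.' else c

-- the loop over segments with the alternating `inside` flag
def mapSegs : Bool → List (List Char) → List (List Char)
  | _, [] => []
  | inside, s :: rest => (if inside then s.map convComma else s) :: mapSegs (!inside) rest

def quote_comma_fix_alt (aline : String) : String :=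
  let p := splitQuote aline.toList
  String.mk (List.intercalate ['"'] (mapSegs false (p.1 :: p.2)))

-- ===== PRECONDITION & SPEC =====
def Spec_quote_comma_fix (aline : String) (out : String) : Prop := out = quote_comma_fix_alt aline
instance (aline : String) (out : String) : Decidable (Spec_quote_comma_fix aline out) := by unfold Spec_quote_comma_fix; infer_instance

-- ===== CLAIM (what is proved, stated in full; the proofs are below) =====
def Claim_equal_quote_comma_fix : Prop := ∀ (aline : String), Dom_quote_comma_fix aline → Spec_quote_comma_fix aline (quote_comma_fix aline)

-- ===== LEMMAS AND PROOFS =====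

lemma intercalate_cons (sep x : List Char) (S : List (List Char)) :
    List.intercalate sep (x :: S) = x ++ (if S = [] then [] else sep ++ List.intercalate sep S) := by
  cases S with
  | nil => simp [List.intercalate]
  | cons y ys => simp [List.intercalate, List.intersperse]

lemma go_eq_alt (cs : List Char) :
    quote_comma_fix_go 0 cs
      = List.intercalate ['"'] (mapSegs false ((splitQuote cs).1 :: (splitQuote cs).2)) ∧
    quote_comma_fix_go 1 cs
      = List.intercalate ['"'] (mapSegs true ((splitQuote cs).1 :: (splitQuote cs).2)) := by
  induction cs with
  | nil => simp [quote_comma_fix_go, splitQuote, mapSegs, List.intercalate]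
  | cons c cs ih =>
    obtain ⟨h0, h1⟩ := ih
    by_cases hq : c = '"'
    · subst hq
      constructor
      · rw [show quote_comma_fix_go 0 ('"' :: cs) = '"' :: quote_comma_fix_go 1 cs by
          simp [quote_comma_fix_go]]
        simp only [splitQuote, mapSegs, Bool.not_false]
        rw [intercalate_cons]
        simp [h1, mapSegs]
      · rw [show quote_comma_fix_go 1 ('"' :: cs) = '"' :: quote_comma_fix_go 0 cs by
          simp [quote_comma_fix_go]]
        simp only [splitQuote, mapSegs, Bool.not_true]
        rw [intercalate_cons]
        simp [h0, mapSegs]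
    · constructor
      · rw [show quote_comma_fix_go 0 (c :: cs) = c :: quote_comma_fix_go 0 cs by
          simp [quote_comma_fix_go, hq]]
        simp only [splitQuote, if_neg hq, mapSegs, Bool.not_false]
        rw [intercalate_cons, h0]
        simp only [mapSegs, Bool.not_false]
        rw [intercalate_cons]
        simp
      · rw [show quote_comma_fix_go 1 (c :: cs) = convComma c :: quote_comma_fix_go 1 cs by
          by_cases hc : c = ','
          · simp [quote_comma_fix_go, hq, hc, convComma]
          · simp [quote_comma_fix_go, hq, hc, convComma]]
        simp only [splitQuote, if_neg hq, mapSegs, Bool.not_true, List.map_cons]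
        rw [intercalate_cons, h1]
        simp only [mapSegs, Bool.not_true]
        rw [intercalate_cons]
        simp

-- ===== VERDICT (by name: the statement is the Claim_ definition above) =====
theorem quote_comma_fix_spec : Claim_equal_quote_comma_fix := by
  intro aline _
  show _ = _
  simp only [quote_comma_fix, quote_comma_fix_alt]
  exact congrArg String.mk (go_eq_alt aline.toList).1
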